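-- pv_equiv track=rewrite | github.com/moshekagan/personal_teaching | Ofri_Bar_Ilan/moed_a/ex4.py | gematria
-- ===== SOURCE A (Python) =====
-- def gematria(word):
--     if len(word) == 0:
--         return 0
--
--     s = gematria(word[1:])
--
--     a = word[0].lower()
--     if 'a' <= a <= 'z':
--         s += ord(a) - ord('a') + 1
--
--     return s
-- ===== SOURCE B (Python) =====
-- def gematria(word):
--     total = 0
--     for c in word:
--         n = ord(c)
--         if 65 <= n <= 90:
--             total += n - 64
--         elif 97 <= n <= 122:
--             total += n - 96
--     return total
-- ===== Notes on version B (the rewrite author's own statement) =====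
-- stated objective: simpler
-- what changed: Replaced the recursion over the string's suffix (which lowercases each character and compares it to 'a'..'z') with a flat accumulator loop that dispatches directly on the numeric code ord(c) against the uppercase and lowercase ASCII ranges, with no lower() call and no slicing.
import Mathlib
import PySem

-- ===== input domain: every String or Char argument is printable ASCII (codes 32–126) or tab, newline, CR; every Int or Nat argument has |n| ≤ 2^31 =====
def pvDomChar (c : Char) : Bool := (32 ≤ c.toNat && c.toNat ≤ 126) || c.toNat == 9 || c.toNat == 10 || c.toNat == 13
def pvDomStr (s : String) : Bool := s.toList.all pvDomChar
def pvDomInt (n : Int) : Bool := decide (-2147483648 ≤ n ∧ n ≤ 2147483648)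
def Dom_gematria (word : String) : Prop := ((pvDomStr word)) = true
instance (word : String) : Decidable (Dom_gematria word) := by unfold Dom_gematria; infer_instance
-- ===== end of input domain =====

-- B replaces A's suffix recursion (lower() then compare to 'a'..'z') with a flat loop
-- dispatching on the numeric ASCII code of each character (simpler; same values).

-- ===== PORT A =====
-- recursion on the list of characters, mirroring A's `word[1:]` recursion
def gematriaRec (cs : List Char) : Int :=
  match cs with
  | [] => 0
  | c :: rest =>
    let s := gematriaRec rest
    let a := PySem.Chars.lowerChar c
    if 'a' ≤ a ∧ a ≤ 'z' then s + ((a.toNat : Int) - ('a'.toNat : Int) + 1) else s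

def gematria (word : String) : Int := gematriaRec word.toList

-- ===== PORT B =====
-- B: flat accumulator loop; per character, dispatch on ord(c) against the two ASCII ranges
def gematria_alt (word : String) : Int :=
  word.toList.foldl
    (fun total c =>
      let n : Int := (c.toNat : Int)
      if 65 ≤ n ∧ n ≤ 90 then total + (n - 64)
      else if 97 ≤ n ∧ n ≤ 122 then total + (n - 96)
      else total)
    0

-- ===== PRECONDITION & SPEC =====
def Spec_gematria (word : String) (out : Int) : Prop := out = gematria_alt word
instance (word : String) (out : Int) : Decidable (Spec_gematria word out) := by unfold Spec_gematria; infer_instance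

-- ===== CLAIM (what is proved, stated in full; the proofs are below) =====
def Claim_equal_gematria : Prop := ∀ (word : String), Dom_gematria word → Spec_gematria word (gematria word)

-- ===== LEMMAS AND PROOFS =====
-- per-character value as B computes it (B's loop body with the local `n` inlined)
def pvStepB (total : Int) (c : Char) : Int :=
  if 65 ≤ (c.toNat : Int) ∧ (c.toNat : Int) ≤ 90 then total + ((c.toNat : Int) - 64)
  else if 97 ≤ (c.toNat : Int) ∧ (c.toNat : Int) ≤ 122 then total + ((c.toNat : Int) - 96)
  else total

-- Char's order is the order of the code points (definitional)
theorem char_le_iff (c d : Char) : (c ≤ d) ↔ c.toNat ≤ d.toNat := Iff.rfl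

theorem alt_eq_foldl_pvStepB (word : String) :
    gematria_alt word = word.toList.foldl pvStepB 0 := rfl

theorem pvStepB_shift (cs : List Char) (s : Int) :
    cs.foldl pvStepB s = s + cs.foldl pvStepB 0 := by
  induction cs generalizing s with
  | nil => simp
  | cons c rest ih =>
    simp only [List.foldl_cons]
    rw [ih (pvStepB s c), ih (pvStepB 0 c)]
    unfold pvStepB
    split_ifs <;> ring

-- A's per-character branch (lowercase then compare) equals B's numeric dispatch, for every Char
theorem step_agree (s : Int) (c : Char) :
    (let a := PySem.Chars.lowerChar c;
     if 'a' ≤ a ∧ a ≤ 'z' then s + ((a.toNat : Int) - ('a'.toNat : Int) + 1) else s)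
    = pvStepB s c := by
  have ha : 'a'.toNat = 97 := rfl
  have hz : 'z'.toNat = 122 := rfl
  have hval : ∀ m : Nat, m ≤ 122 → (Char.ofNat m).toNat = m := by
    intro m hm
    have : Nat.isValidChar m := Or.inl (by omega)
    simp [Char.ofNat, this, Char.toNat, Char.ofNatAux]
  by_cases hu : PySem.Chars.isupper c = true
  · have hle : 'A' ≤ c ∧ c ≤ 'Z' := by
      simpa [PySem.Chars.isupper] using hu
    have hn : 65 ≤ c.toNat ∧ c.toNat ≤ 90 :=
      ⟨(char_le_iff _ _).mp hle.1, (char_le_iff _ _).mp hle.2⟩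
    have hlower : PySem.Chars.lowerChar c = Char.ofNat (c.toNat + 32) := by
      simp [PySem.Chars.lowerChar, hu]
    have htn : (PySem.Chars.lowerChar c).toNat = c.toNat + 32 := by
      rw [hlower]; exact hval _ (by omega)
    have hrange : 'a' ≤ PySem.Chars.lowerChar c ∧ PySem.Chars.lowerChar c ≤ 'z' :=
      ⟨(char_le_iff _ _).mpr (by rw [htn, ha]; omega),
       (char_le_iff _ _).mpr (by rw [htn, hz]; omega)⟩
    simp only [pvStepB, hrange, and_self, if_pos, htn]
    rw [if_pos (by constructor <;> omega : 65 ≤ (c.toNat : Int) ∧ (c.toNat : Int) ≤ 90)]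
    push_cast
    omega
  · have hlower : PySem.Chars.lowerChar c = c := by
      simp [PySem.Chars.lowerChar, hu]
    have hnotup : ¬ (65 ≤ c.toNat ∧ c.toNat ≤ 90) := by
      intro h
      exact hu (by simp [PySem.Chars.isupper, char_le_iff]; omega)
    simp only [hlower, pvStepB]
    by_cases hl : 'a' ≤ c ∧ c ≤ 'z'
    · have hn : 97 ≤ c.toNat ∧ c.toNat ≤ 122 :=
        ⟨(char_le_iff _ _).mp hl.1, (char_le_iff _ _).mp hl.2⟩
      rw [if_pos hl, if_neg (by omega), if_pos (by constructor <;> omega)]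
      push_cast
      omega
    · have hn : ¬ (97 ≤ c.toNat ∧ c.toNat ≤ 122) := by
        intro h
        exact hl ⟨(char_le_iff _ _).mpr h.1, (char_le_iff _ _).mpr h.2⟩
      rw [if_neg hl, if_neg (by omega), if_neg (by omega)]

theorem rec_eq_foldl (cs : List Char) : gematriaRec cs = cs.foldl pvStepB 0 := by
  induction cs with
  | nil => rfl
  | cons c rest ih =>
    have h : gematriaRec (c :: rest) = pvStepB (gematriaRec rest) c :=
      step_agree (gematriaRec rest) c
    rw [List.foldl_cons, pvStepB_shift, h, ih]
    unfold pvStepB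
    split_ifs <;> ring

-- ===== VERDICT (by name: the statement is the Claim_ definition above) =====
theorem gematria_spec : Claim_equal_gematria := by
  intro word _
  unfold Spec_gematria gematria
  rw [alt_eq_foldl_pvStepB]
  exact rec_eq_foldl word.toList
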